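-- pv_equiv track=rewrite | github.com/jinxac/codeforces | 118A.py | solve
-- ===== SOURCE A (Python) =====
-- def solve(string):
--   res = []
--   for element in string:
--     if element.lower() in set(['a', 'e', 'i','o','u', 'y']):
--       continue
--
--     res.append('.')
--     res.append(element.lower())
--
--   return ''.join(res)
-- ===== SOURCE B (Python) =====
-- def solve(string):
--   s = string.lower()
--   for v in 'aeiouy':
--     s = s.replace(v, '')
--   return ('.' + '.'.join(s)) if s else ''
-- ===== Notes on version B (the rewrite author's own statement) =====
-- stated objective: alternative
-- what changed: Instead of A's single character loop that tests each char against a vowel set and appends two items per consonant, B lowercases once, then makes six staged whole-string replace passes (one per vowel, each deleting all its occurrences), and finally interleaves the dots with a single join.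
import Mathlib
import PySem

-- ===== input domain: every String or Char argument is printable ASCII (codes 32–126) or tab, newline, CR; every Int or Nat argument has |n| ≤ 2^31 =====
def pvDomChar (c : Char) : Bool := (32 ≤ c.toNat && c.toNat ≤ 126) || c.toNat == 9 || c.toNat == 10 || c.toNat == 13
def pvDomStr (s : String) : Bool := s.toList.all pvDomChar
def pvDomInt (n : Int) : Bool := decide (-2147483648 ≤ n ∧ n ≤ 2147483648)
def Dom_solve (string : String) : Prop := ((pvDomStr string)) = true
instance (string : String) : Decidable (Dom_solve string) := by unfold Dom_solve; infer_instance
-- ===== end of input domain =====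

-- B replaces A's per-character loop (vowel-set test, two appends per consonant) by six staged
-- whole-string replace passes deleting each vowel, then one dot-join; objective: alternative (timed faster by the check).

-- ===== PORT A =====
-- A: for element in string: skip if element.lower() in set('aeiouy'); else append '.' and element.lower(); ''.join.
def solve (string : String) : String :=
  String.ofList (string.toList.foldl
    (fun (res : List Char) element =>
      if PySem.Set.contains (PySem.Set.ofList ['a', 'e', 'i', 'o', 'u', 'y'])
           (PySem.Chars.lowerChar element) then res
      else res ++ ['.', PySem.Chars.lowerChar element])
    [])

-- ===== PORT B =====
-- B: s = string.lower(); for v in 'aeiouy': s = s.replace(v, ''); ('.' + '.'.join(s)) if s else ''.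
def solve_alt (string : String) : String :=
  let s := ['a', 'e', 'i', 'o', 'u', 'y'].foldl
    (fun (s : List Char) v => PySem.Chars.replace s [v] [])
    (PySem.Chars.lower string.toList)
  if s.isEmpty then ""
  else String.ofList ('.' :: PySem.Chars.join ['.'] (s.map (fun c => [c])))

-- ===== PRECONDITION & SPEC =====
def Spec_solve (string : String) (out : String) : Prop := out = solve_alt string
instance (string : String) (out : String) : Decidable (Spec_solve string out) := by unfold Spec_solve; infer_instance

-- ===== CLAIM (what is proved, stated in full; the proofs are below) =====
def Claim_equal_solve : Prop := ∀ (string : String), Dom_solve string → Spec_solve string (solve string)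

-- ===== LEMMAS AND PROOFS =====

-- A's vowel-set test on a char equals plain list membership
lemma vowel_test_eq (c : Char) :
    PySem.Set.contains (PySem.Set.ofList ['a', 'e', 'i', 'o', 'u', 'y']) c
      = ['a', 'e', 'i', 'o', 'u', 'y'].contains c := by
  have hset : PySem.Set.ofList ['a', 'e', 'i', 'o', 'u', 'y'] = ['a', 'e', 'i', 'o', 'u', 'y'] := by
    decide
  simp [PySem.Set.contains, hset]

-- the replace worker on a single-char pattern with empty replacement is a filter
lemma replace_go_single (v : Char) :
    ∀ (l : List Char) (fuel : Nat) (acc : List Char), l.length ≤ fuel →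
      PySem.Chars.replace.go [v] [] fuel l acc = acc.reverse ++ l.filter (fun c => c != v) := by
  intro l
  induction l with
  | nil =>
    intro fuel acc _
    cases fuel <;> simp [PySem.Chars.replace.go]
  | cons c t ih =>
    intro fuel acc hle
    cases fuel with
    | zero => simp at hle
    | succ f =>
      simp only [List.length_cons, Nat.succ_le_succ_iff] at hle
      rw [PySem.Chars.replace.go]
      by_cases h : v = c
      · subst h
        have hpre : [v].isPrefixOf (v :: t) = true := by
          simp [List.isPrefixOf]
        rw [hpre]
        simp only [if_true, List.length_cons, List.length_nil, List.drop_succ_cons,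
          List.drop_zero, List.reverse_nil, List.nil_append]
        rw [ih f acc hle]
        simp
      · have hpre : [v].isPrefixOf (c :: t) = false := by
          simp [List.isPrefixOf]
          exact fun hvc => h hvc
        rw [hpre]
        simp only [Bool.false_eq_true, if_false]
        rw [ih f (c :: acc) hle]
        have hcv : (c != v) = true := by
          simp only [bne_iff_ne, ne_eq]
          exact fun hcv => h hcv.symm
        simp [hcv]

-- s.replace(v, '') for a single char v deletes exactly the occurrences of v
lemma replace_single_eq_filter (l : List Char) (v : Char) :
    PySem.Chars.replace l [v] [] = l.filter (fun c => c != v) := by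
  rw [PySem.Chars.replace]
  simp only [List.isEmpty_cons, Bool.false_eq_true, if_false]
  rw [replace_go_single v l l.length [] (le_refl _)]
  simp

-- the six staged replace passes equal one filter against the vowel list
lemma foldl_replace_eq_filter (vs : List Char) (l : List Char) :
    vs.foldl (fun (s : List Char) v => PySem.Chars.replace s [v] []) l
      = l.filter (fun c => !(vs.contains c)) := by
  induction vs generalizing l with
  | nil => simp
  | cons v rest ih =>
    rw [List.foldl_cons, ih, replace_single_eq_filter, List.filter_filter]
    apply List.filter_congr
    intro c _
    by_cases h : c = v <;> simp [h]

-- dropping empty pieces of an if-flatMap is flatMap over the filter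
lemma flatMap_if_nil_eq_filter (p : Char → Bool) (f : Char → List Char) (l : List Char) :
    l.flatMap (fun c => if p c then [] else f c)
      = (l.filter (fun c => !p c)).flatMap f := by
  induction l with
  | nil => rfl
  | cons x xs ih =>
    by_cases h : p x <;> simp [h, ih]

-- interleaving dots by flatMap equals B's dot-prefixed '.'-join
lemma flatMap_dot_eq_join (ks : List Char) :
    ks.flatMap (fun c => ['.', c]) =
      if ks.isEmpty then []
      else '.' :: PySem.Chars.join ['.'] (ks.map (fun c => [c])) := by
  induction ks with
  | nil => rfl
  | cons c rest ih =>
    cases rest with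
    | nil => simp [PySem.Chars.join_singleton]
    | cons d rest' =>
      simp only [List.flatMap_cons, List.isEmpty_cons, Bool.false_eq_true, if_false,
        List.map_cons] at ih ⊢
      rw [ih, PySem.Chars.join_cons_cons]
      simp

theorem solve_spec : Claim_equal_solve := by
  intro s _
  unfold Spec_solve
  simp only [solve, solve_alt]
  have hfold : s.toList.foldl
      (fun (res : List Char) element =>
        if PySem.Set.contains (PySem.Set.ofList ['a', 'e', 'i', 'o', 'u', 'y'])
             (PySem.Chars.lowerChar element) then res
        else res ++ ['.', PySem.Chars.lowerChar element]) []
      = s.toList.foldl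
      (fun (res : List Char) element =>
        res ++ (if PySem.Set.contains (PySem.Set.ofList ['a', 'e', 'i', 'o', 'u', 'y'])
                     (PySem.Chars.lowerChar element) then []
                else ['.', PySem.Chars.lowerChar element])) [] :=
    PySem.List.foldl_congr_mem s.toList _ _ _ (fun acc x _ => by split <;> simp)
  rw [hfold, PySem.List.foldl_append_eq_flatMap, List.nil_append]
  have hlow : PySem.Chars.lower s.toList = s.toList.map PySem.Chars.lowerChar := rfl
  have hmap : s.toList.flatMap
      (fun element =>
        if PySem.Set.contains (PySem.Set.ofList ['a', 'e', 'i', 'o', 'u', 'y'])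
             (PySem.Chars.lowerChar element) then []
        else ['.', PySem.Chars.lowerChar element])
      = (s.toList.map PySem.Chars.lowerChar).flatMap
          (fun c => if ['a', 'e', 'i', 'o', 'u', 'y'].contains c then []
                    else ['.', c]) := by
    rw [List.flatMap_map]
    exact List.flatMap_congr (fun c _ => by rw [vowel_test_eq])
  rw [hmap, flatMap_if_nil_eq_filter, flatMap_dot_eq_join,
    foldl_replace_eq_filter, hlow]
  split <;> rfl
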